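-- pv_equiv track=rewrite | github.com/DeleMike/s-game | lab.py | get_player_pos
-- ===== SOURCE A (Python) =====
-- def get_player_pos(arr):
--     """
--     Given a description of a game state, this returns the position of of the '[player]' object.
--     If it returns (-1,-1) then that means object wasn't found,
--     """
--     row_pos = 0
--     col_pos = 0
--     z_pos = 0
--     n_col_pos = 0
--
--     # trying to access the "['player']" object and get its location.
--     for rows in arr:
--         for cols in rows:
--             for z_row in cols:
--                 if z_row == 'player':
--                     for row in rows:
--                         for col in row:
--                             if col == 'player':
--                                 return row_pos, n_col_pos
--                         n_col_pos += 1
--                     break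
--                 z_pos += 1
--             col_pos += 1
--         row_pos += 1
--
--     return -1, -1
-- ===== SOURCE B (Python) =====
-- def get_player_pos(arr):
--     for i, rows in enumerate(arr):
--         for j, cols in enumerate(rows):
--             if any(z == 'player' for z in cols):
--                 return i, j
--     return -1, -1
-- ===== Notes on version B (the rewrite author's own statement) =====
-- stated objective: simpler
-- what changed: One enumerate pass returning (outer index, middle index) at the first sublist containing 'player', dropping A's five nested loops, the redundant rescan of the same rows, and the z_pos/col_pos/n_col_pos counters.
import Mathlib
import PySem

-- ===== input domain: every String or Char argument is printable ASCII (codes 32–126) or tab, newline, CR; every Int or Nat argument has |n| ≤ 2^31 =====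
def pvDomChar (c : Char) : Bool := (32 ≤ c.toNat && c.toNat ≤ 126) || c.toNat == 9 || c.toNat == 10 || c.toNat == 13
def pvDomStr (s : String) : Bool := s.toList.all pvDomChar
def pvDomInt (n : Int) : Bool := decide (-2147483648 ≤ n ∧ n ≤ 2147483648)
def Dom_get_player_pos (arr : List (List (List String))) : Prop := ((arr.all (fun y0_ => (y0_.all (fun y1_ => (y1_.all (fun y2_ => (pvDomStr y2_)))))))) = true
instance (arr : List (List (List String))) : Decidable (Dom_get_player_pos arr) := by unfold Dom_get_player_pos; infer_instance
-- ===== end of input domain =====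

-- B replaces A's five nested loops, redundant rescan and counters by one enumerate pass (objective: simpler).

-- ===== PORT A =====
-- innermost 'for z_row in cols: if z_row == 'player'' scan (also the 'for col in row' rescan body)
def pvAHasPlayer : List String → Bool
  | [] => false
  | c :: cs => if c == "player" then true else pvAHasPlayer cs

-- the rescan 'for row in rows: for col in row: … ; n_col_pos += 1'
def pvARescan : List (List String) → Int → Option Int
  | [], _ => none
  | row :: rest, n => if pvAHasPlayer row then some n else pvARescan rest (n + 1)

-- middle loop 'for cols in rows'; returns (early return value, n_col_pos after the loop)
def pvAInner (full : List (List String)) : List (List String) → Int → Int → Option (Int × Int) × Int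
  | [], _, n => (none, n)
  | cols :: rest, rowPos, n =>
    if pvAHasPlayer cols then
      match pvARescan full n with
      | some j => (some (rowPos, j), n)
      | none => pvAInner full rest rowPos (n + (full.length : Int))  -- 'break' after a failed rescan
    else pvAInner full rest rowPos n

-- outer loop 'for rows in arr', threading row_pos and n_col_pos
def pvAOuter : List (List (List String)) → Int → Int → Int × Int
  | [], _, _ => (-1, -1)
  | rows :: rest, rowPos, n =>
    match pvAInner rows rows rowPos n with
    | (some p, _) => p
    | (none, n') => pvAOuter rest (rowPos + 1) n'

def get_player_pos (arr : List (List (List String))) : Int × Int := pvAOuter arr 0 0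

-- ===== PORT B =====
-- inner 'for j, cols in enumerate(rows): if any(z == 'player' for z in cols): return i, j'
def pvBInner : List (List String) → Int → Option Int
  | [], _ => none
  | cols :: rest, j => if cols.any (fun z => z == "player") then some j else pvBInner rest (j + 1)

def pvBOuter : List (List (List String)) → Int → Int × Int
  | [], _ => (-1, -1)
  | rows :: rest, i =>
    match pvBInner rows 0 with
    | some j => (i, j)
    | none => pvBOuter rest (i + 1)

def get_player_pos_alt (arr : List (List (List String))) : Int × Int := pvBOuter arr 0

-- ===== PRECONDITION & SPEC =====
def Spec_get_player_pos (arr : List (List (List String))) (out : Int × Int) : Prop := out = get_player_pos_alt arr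
instance (arr : List (List (List String))) (out : Int × Int) : Decidable (Spec_get_player_pos arr out) := by unfold Spec_get_player_pos; infer_instance

-- ===== CLAIM (what is proved, stated in full; the proofs are below) =====
def Claim_equal_get_player_pos : Prop := ∀ (arr : List (List (List String))), Dom_get_player_pos arr → Spec_get_player_pos arr (get_player_pos arr)

-- ===== LEMMAS AND PROOFS =====
theorem pvAHasPlayer_eq_any (l : List String) : pvAHasPlayer l = l.any (fun z => z == "player") := by
  induction l with
  | nil => rfl
  | cons c cs ih => by_cases h : c == "player" <;> simp [pvAHasPlayer, List.any_cons, ih, h]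

theorem pvARescan_eq_pvBInner (l : List (List String)) : ∀ n, pvARescan l n = pvBInner l n := by
  induction l with
  | nil => intro n; rfl
  | cons row rest ih => intro n; simp [pvARescan, pvBInner, pvAHasPlayer_eq_any, ih]

theorem pvARescan_isSome (l : List (List String)) (c : List String) (hc : c ∈ l)
    (hp : pvAHasPlayer c = true) : ∀ n, (pvARescan l n).isSome := by
  induction l with
  | nil => cases hc
  | cons row rest ih =>
    intro n
    rcases List.mem_cons.mp hc with h | h
    · subst h; simp [pvARescan, hp]
    · by_cases hr : pvAHasPlayer row <;> simp [pvARescan, hr, ih h]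

theorem pvAInner_eq (full : List (List String)) :
    ∀ (l : List (List String)) (rowPos n : Int), (∀ c ∈ l, c ∈ full) →
    pvAInner full l rowPos n =
      (if l.any pvAHasPlayer then (pvARescan full n).map (fun j => (rowPos, j)) else none, n) := by
  intro l
  induction l with
  | nil => intro rowPos n _; simp [pvAInner]
  | cons cols rest ih =>
    intro rowPos n hsub
    by_cases hc : pvAHasPlayer cols
    · have hs : (pvARescan full n).isSome :=
        pvARescan_isSome full cols (hsub cols (List.mem_cons_self)) hc n
      rcases Option.isSome_iff_exists.mp hs with ⟨j, hj⟩
      simp [pvAInner, hc, hj]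
    · have : pvAInner full (cols :: rest) rowPos n = pvAInner full rest rowPos n := by
        simp [pvAInner, hc]
      rw [this, ih rowPos n (fun c hcm => hsub c (List.mem_cons_of_mem _ hcm))]
      simp [List.any_cons, hc]

theorem pvBInner_none (l : List (List String)) (ha : l.any pvAHasPlayer = false) :
    ∀ j, pvBInner l j = none := by
  induction l with
  | nil => intro j; rfl
  | cons cols rest ih =>
    intro j
    rw [List.any_cons, Bool.or_eq_false_iff] at ha
    simp [pvBInner, ← pvAHasPlayer_eq_any, ha.1, ih ha.2]

theorem pvAOuter_eq_pvBOuter (arr : List (List (List String))) :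
    ∀ (i : Int), pvAOuter arr i 0 = pvBOuter arr i := by
  induction arr with
  | nil => intro i; rfl
  | cons rows rest ih =>
    intro i
    have h := pvAInner_eq rows rows i 0 (fun _ h => h)
    by_cases ha : rows.any pvAHasPlayer
    · have hs : (pvARescan rows 0).isSome := by
        rcases List.any_eq_true.mp ha with ⟨c, hc, hp⟩
        exact pvARescan_isSome rows c hc hp 0
      rcases Option.isSome_iff_exists.mp hs with ⟨j, hj⟩
      have hb : pvBInner rows 0 = some j := by rw [← pvARescan_eq_pvBInner, hj]
      simp [pvAOuter, pvBOuter, h, ha, hj, hb]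
    · have hb : pvBInner rows 0 = none :=
        pvBInner_none rows (Bool.not_eq_true _ ▸ ha) 0
      simp [pvAOuter, pvBOuter, h, ha, hb, ih]

-- ===== VERDICT (by name: the statement is the Claim_ definition above) =====
theorem get_player_pos_spec : Claim_equal_get_player_pos := by
  intro arr _
  unfold Spec_get_player_pos get_player_pos get_player_pos_alt
  exact pvAOuter_eq_pvBOuter arr 0
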